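-- pv_equiv track=rewrite | github.com/hmamaysky/Energy | TextProcessing/topic_allocation.py | generate_month_list
-- ===== SOURCE A (Python) =====
-- def generate_month_list(start_month, end_month):
--     start_year = int(str(start_month)[:4])
--     start_month_num = int(str(start_month)[4:])
--
--     end_year = int(str(end_month)[:4])
--     end_month_num = int(str(end_month)[4:])
--
--     month_list = []
--
--     for year in range(start_year, end_year + 1):
--         start = start_month_num if year == start_year else 1
--         end = end_month_num + 1 if year == end_year else 13
--
--         for month in range(start, end):
--             month_list.append(f"{year}{month:02}")
--
--     return month_list
-- ===== SOURCE B (Python) =====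
-- def generate_month_list(start_month, end_month):
--     sy = int(str(start_month)[:4]); sm = int(str(start_month)[4:])
--     ey = int(str(end_month)[:4]); em = int(str(end_month)[4:])
--     if ey < sy:
--         return []
--     if sy == ey:
--         return [f"{sy}{m:02}" for m in range(sm, em + 1)]
--     first = [f"{sy}{m:02}" for m in range(sm, 13)]
--     middle = [f"{i // 12}{i % 12 + 1:02}" for i in range((sy + 1) * 12, ey * 12)]
--     last = [f"{ey}{m:02}" for m in range(1, em + 1)]
--     return first + middle + last
-- ===== Notes on version B (the rewrite author's own statement) =====
-- stated objective: alternative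
-- what changed: Replaces the nested year/month loops with per-year clamping branches by an early-exit first-year/middle-years/last-year decomposition whose middle (complete) years come from one flat divmod pass over absolute month indices year*12+month-1.
import Mathlib
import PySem

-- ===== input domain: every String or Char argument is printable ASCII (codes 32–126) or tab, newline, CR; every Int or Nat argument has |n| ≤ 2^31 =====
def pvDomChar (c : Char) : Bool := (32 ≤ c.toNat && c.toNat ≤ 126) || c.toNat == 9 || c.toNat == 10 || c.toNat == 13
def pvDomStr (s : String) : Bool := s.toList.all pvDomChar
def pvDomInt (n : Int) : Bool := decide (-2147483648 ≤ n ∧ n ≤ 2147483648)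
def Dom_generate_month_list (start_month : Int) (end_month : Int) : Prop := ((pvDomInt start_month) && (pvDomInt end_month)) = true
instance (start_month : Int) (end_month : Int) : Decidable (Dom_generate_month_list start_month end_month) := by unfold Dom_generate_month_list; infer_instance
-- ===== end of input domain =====

-- ===== PORT A =====
-- B replaces A's nested year/month loops (with per-year clamping branches) by an early-exit
-- first-year/middle-years/last-year decomposition whose middle years come from one flat
-- divmod pass over absolute month indices; same return value on every input A returns on.
-- shared transliteration of the parsing lines both Pythons contain:
--   int(str(n)[:4]) and int(str(n)[4:])
def pyParseYear? (n : Int) : Option Int :=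
  PySem.Int.ofStr? (PySem.Str.slice (PySem.Int.toStr n) (some 0) (some 4))

def pyParseMonth? (n : Int) : Option Int :=
  PySem.Int.ofStr? (PySem.Str.slice (PySem.Int.toStr n) (some 4) none)

-- f"{m:02}" for width 2: zero-pad to 2 characters (a negative m already has >= 2 chars, so
-- this is exact for width 2)
def fmt02 (m : Int) : List Char :=
  let s := PySem.Int.toChars m
  if s.length < 2 then '0' :: s else s

-- f"{year}{month:02}"
def fmtYM (year month : Int) : String :=
  String.ofList (PySem.Int.toChars year ++ fmt02 month)

def generate_month_list (start_month : Int) (end_month : Int) : List String :=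
  match pyParseYear? start_month, pyParseMonth? start_month,
        pyParseYear? end_month, pyParseMonth? end_month with
  | some start_year, some start_month_num, some end_year, some end_month_num =>
      (PySem.List.pyRange start_year (end_year + 1) 1).foldl (fun month_list year =>
        let start := if year = start_year then start_month_num else 1
        let stop  := if year = end_year then end_month_num + 1 else 13
        (PySem.List.pyRange start stop 1).foldl (fun acc month =>
          acc ++ [fmtYM year month]) month_list) []
  | _, _, _, _ => []   -- int() raised in the Python: nothing is compared there

-- ===== PORT B =====
def generate_month_list_alt (start_month : Int) (end_month : Int) : List String :=
  match pyParseYear? start_month with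
  | none => []   -- int() raised in the Python: nothing is compared there
  | some sy =>
    match pyParseMonth? start_month with
    | none => []
    | some sm =>
      match pyParseYear? end_month with
      | none => []
      | some ey =>
        match pyParseMonth? end_month with
        | none => []
        | some em =>
          if ey < sy then []
          else if sy = ey then
            (PySem.List.pyRange sm (em + 1) 1).map (fun m => fmtYM sy m)
          else
            (PySem.List.pyRange sm 13 1).map (fun m => fmtYM sy m)
              ++ (PySem.List.pyRange ((sy + 1) * 12) (ey * 12) 1).map (fun i =>
                    fmtYM (PySem.Int.floordiv i 12) (PySem.Int.mod i 12 + 1))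
              ++ (PySem.List.pyRange 1 (em + 1) 1).map (fun m => fmtYM ey m)

-- ===== PRECONDITION & SPEC =====
-- Pre_ excludes exactly the inputs where the Python raises: int(str(n)[4:]) is int('') —
-- a ValueError — precisely when str(n) has at most 4 characters, i.e. -999 <= n <= 9999.
def Pre_generate_month_list (start_month : Int) (end_month : Int) : Prop :=
  (start_month ≤ -1000 ∨ 10000 ≤ start_month) ∧ (end_month ≤ -1000 ∨ 10000 ≤ end_month)
instance (start_month : Int) (end_month : Int) : Decidable (Pre_generate_month_list start_month end_month) := by
  unfold Pre_generate_month_list; infer_instance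

def pvWitness_generate_month_list : Int × Int := (202311, 202402)

def Spec_generate_month_list (start_month : Int) (end_month : Int) (out : List String) : Prop := out = generate_month_list_alt start_month end_month
instance (start_month : Int) (end_month : Int) (out : List String) : Decidable (Spec_generate_month_list start_month end_month out) := by unfold Spec_generate_month_list; infer_instance

-- ===== CLAIM (what is proved, stated in full; the proofs are below) =====
def Claim_equal_generate_month_list : Prop := ∀ (start_month : Int) (end_month : Int), Dom_generate_month_list start_month end_month → Pre_generate_month_list start_month end_month → Spec_generate_month_list start_month end_month (generate_month_list start_month end_month)

-- ===== LEMMAS AND PROOFS =====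

-- reconstructing year and month from the absolute month index
lemma fmt_divmod (y m : Int) (h1 : 1 ≤ m) (h2 : m ≤ 12) :
    fmtYM (PySem.Int.floordiv (y * 12 + m - 1) 12) (PySem.Int.mod (y * 12 + m - 1) 12 + 1)
      = fmtYM y m := by
  have hd : PySem.Int.floordiv (y * 12 + m - 1) 12 = y := by
    rw [PySem.Int.floordiv_eq_iff_of_pos (by omega)]; omega
  have hm : PySem.Int.mod (y * 12 + m - 1) 12 = m - 1 := by
    have := PySem.Int.floordiv_mul_add_mod (y * 12 + m - 1) 12
    rw [hd] at this; omega
  rw [hd, hm]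
  norm_num

-- one year's slice of the flat index range is one inner loop of A
lemma seg_eq (y a b : Int) (ha : 1 ≤ a) (hb : b ≤ 13) :
    (PySem.List.pyRange (y * 12 + a - 1) (y * 12 + b - 1) 1).map
        (fun i => fmtYM (PySem.Int.floordiv i 12) (PySem.Int.mod i 12 + 1))
      = (PySem.List.pyRange a b 1).map (fmtYM y) := by
  rw [PySem.List.pyRange_one, PySem.List.pyRange_one]
  have hlen : (y * 12 + b - 1 - (y * 12 + a - 1)).toNat = (b - a).toNat := by omega
  rw [hlen, List.map_map, List.map_map]
  apply List.map_congr_left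
  intro k hk
  simp only [List.mem_range] at hk
  simp only [Function.comp]
  have hm : y * 12 + a - 1 + (k : Int) = y * 12 + (a + k) - 1 := by omega
  rw [hm]
  exact fmt_divmod y (a + k) (by omega) (by omega)

-- the middle (complete) years: one flat divmod pass equals the per-year full inner loops
lemma mid_flat : ∀ (d : Nat) (a b : Int), b = a + (d : Int) →
    (PySem.List.pyRange (a * 12) (b * 12) 1).map
        (fun i => fmtYM (PySem.Int.floordiv i 12) (PySem.Int.mod i 12 + 1))
      = (PySem.List.pyRange a b 1).flatMap (fun y => (PySem.List.pyRange 1 13 1).map (fmtYM y)) := by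
  intro d
  induction d with
  | zero =>
    intro a b hb
    have hba : b = a := by omega
    subst hba
    rw [PySem.List.pyRange_one_eq_nil (le_refl _), PySem.List.pyRange_one_eq_nil (le_refl _)]
    simp
  | succ d ih =>
    intro a b hb
    have hab : a < b := by omega
    rw [PySem.List.pyRange_one_cons hab, List.flatMap_cons]
    rw [PySem.List.pyRange_one_append (a * 12) ((a + 1) * 12) (b * 12) (by omega) (by omega),
        List.map_append]
    have hfst := seg_eq a 1 13 (le_refl 1) (le_refl 13)
    have e1 : a * 12 + 1 - 1 = a * 12 := by ring
    have e2 : a * 12 + 13 - 1 = (a + 1) * 12 := by ring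
    rw [e1, e2] at hfst
    rw [hfst, ih (a + 1) b (by omega)]

-- ===== VERDICT (by name: the statement is the Claim_ definition above) =====
theorem generate_month_list_spec : Claim_equal_generate_month_list := by
  intro s e _ _
  unfold Spec_generate_month_list generate_month_list generate_month_list_alt
  cases h1 : pyParseYear? s with
  | none => rfl
  | some sy =>
  cases h2 : pyParseMonth? s with
  | none => rfl
  | some sm =>
  cases h3 : pyParseYear? e with
  | none => rfl
  | some ey =>
  cases h4 : pyParseMonth? e with
  | none => rfl
  | some em =>
  simp only [PySem.List.foldl_append_singleton_eq_map, PySem.List.foldl_append_eq_flatMap,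
    List.nil_append]
  by_cases hlt : ey < sy
  · rw [if_pos hlt, PySem.List.pyRange_one_eq_nil (show ey + 1 ≤ sy by omega)]
    simp
  · rw [if_neg hlt]
    by_cases heq : sy = ey
    · subst heq
      rw [if_pos rfl, PySem.List.pyRange_one_singleton]
      simp
    · rw [if_neg heq]
      have hlt2 : sy < ey := by omega
      -- years sy .. ey = [sy] ++ middle ++ [ey]
      rw [PySem.List.pyRange_one_append sy (sy + 1) (ey + 1) (by omega) (by omega),
          PySem.List.pyRange_one_append (sy + 1) ey (ey + 1) (by omega) (by omega),
          PySem.List.pyRange_one_singleton, PySem.List.pyRange_one_singleton,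
          List.flatMap_append, List.flatMap_append]
      simp only [List.flatMap_cons, List.flatMap_nil, List.append_nil]
      simp only [ite_true, if_neg heq, if_neg (show ¬ ey = sy from by omega)]
      have hmid : (PySem.List.pyRange (sy + 1) ey 1).flatMap
            (fun y => (PySem.List.pyRange (if y = sy then sm else 1) (if y = ey then em + 1 else 13) 1).map (fmtYM y))
          = (PySem.List.pyRange (sy + 1) ey 1).flatMap
            (fun y => (PySem.List.pyRange 1 13 1).map (fmtYM y)) := by
        apply List.flatMap_congr
        intro y hy
        rw [PySem.List.mem_pyRange_one] at hy
        rw [if_neg (show ¬ y = sy by omega), if_neg (show ¬ y = ey by omega)]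
      rw [hmid, mid_flat (ey - (sy + 1)).toNat (sy + 1) ey (by omega), List.append_assoc]
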